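-- pv_equiv track=rewrite | github.com/jhalucky/py-ques | isFactorial.py | is_factorial_number
-- ===== SOURCE A (Python) =====
-- def is_factorial_number(x):
--     if x == 1:
--         return True  # 0! and 1! are both 1
--
--     fact = 1
--     n = 1
--     while fact < x:
--         n += 1
--         fact *= n
--
--     return fact == x
-- ===== SOURCE B (Python) =====
-- def is_factorial_number(x):
--     if x < 1:
--         return False
--     if x == 1:
--         return True
--     d = 2
--     while x % d == 0:
--         x //= d
--         d += 1
--     return x == 1
-- ===== Notes on version B (the rewrite author's own statement) =====
-- stated objective: alternative
-- what changed: B repeatedly divides x by an increasing divisor and checks that the residue reaches one, instead of A's multiplying successive factorials upward until they reach x.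
import Mathlib
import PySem

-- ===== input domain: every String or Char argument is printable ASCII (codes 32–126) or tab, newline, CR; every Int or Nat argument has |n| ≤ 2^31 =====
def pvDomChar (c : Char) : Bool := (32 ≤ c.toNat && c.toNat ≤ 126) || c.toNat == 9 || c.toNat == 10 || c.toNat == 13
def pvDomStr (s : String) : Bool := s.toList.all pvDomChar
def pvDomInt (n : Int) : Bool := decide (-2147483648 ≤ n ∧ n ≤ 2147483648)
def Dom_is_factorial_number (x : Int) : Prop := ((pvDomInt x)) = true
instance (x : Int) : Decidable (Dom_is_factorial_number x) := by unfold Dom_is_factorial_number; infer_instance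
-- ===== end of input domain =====

-- B checks factorial-hood by dividing x down by an increasing divisor until the residue is not
-- divisible, instead of A's multiplying factorials up until they reach x; no side effects.


-- ===== PORT A =====
-- A's while loop: n += 1; fact *= n while fact < x.  Positivity of fact/n is carried
-- as proof arguments only for termination (fact strictly increases); values are unchanged.
def loopA (x fact n : Int) (hf : 1 ≤ fact) (hn : 1 ≤ n) : Int :=
  if h : fact < x then
    loopA x (fact * (n + 1)) (n + 1) (by nlinarith) (by omega)
  else fact
termination_by (x - fact).toNat
decreasing_by
  have h1 : fact + 1 ≤ fact * (n + 1) := by nlinarith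
  omega

def is_factorial_number (x : Int) : Bool :=
  if x == 1 then true
  else loopA x 1 1 (by omega) (by omega) == x

-- ===== PORT B =====
-- B's while loop: while x % d == 0: x //= d; d += 1.  Positivity proofs are carried only
-- for termination (x strictly shrinks when divided by d ≥ 2).
def loopB (x d : Int) (hx : 1 ≤ x) (hd : 2 ≤ d) : Int :=
  if h : PySem.Int.mod x d = 0 then
    loopB (PySem.Int.floordiv x d) (d + 1)
      (by
        have hdvd : d ∣ x := (PySem.Int.mod_eq_zero_iff_dvd x d).mp h
        obtain ⟨c, hc⟩ := hdvd
        have hc1 : 1 ≤ c := by nlinarith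
        rw [PySem.Int.floordiv_eq_ediv_of_pos (by omega : (0:Int) < d), hc,
          Int.mul_ediv_cancel_left _ (by omega : d ≠ 0)]
        exact hc1)
      (by omega)
  else x
termination_by x.toNat
decreasing_by
  have hdvd : d ∣ x := (PySem.Int.mod_eq_zero_iff_dvd x d).mp h
  obtain ⟨c, hc⟩ := hdvd
  have hc1 : 1 ≤ c := by nlinarith
  have : PySem.Int.floordiv x d = c := by
    rw [PySem.Int.floordiv_eq_ediv_of_pos (by omega : (0:Int) < d), hc,
      Int.mul_ediv_cancel_left _ (by omega : d ≠ 0)]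
  rw [this]
  have : c < x := by nlinarith
  omega

def is_factorial_number_alt (x : Int) : Bool :=
  if h : x < 1 then false
  else if x == 1 then true
  else loopB x 2 (by omega) (by omega) == 1

-- ===== PRECONDITION & SPEC =====
def Spec_is_factorial_number (x : Int) (out : Bool) : Prop := out = is_factorial_number_alt x
instance (x : Int) (out : Bool) : Decidable (Spec_is_factorial_number x out) := by unfold Spec_is_factorial_number; infer_instance

-- ===== CLAIM (what is proved, stated in full; the proofs are below) =====
def Claim_equal_is_factorial_number : Prop := ∀ (x : Int), Dom_is_factorial_number x → Spec_is_factorial_number x (is_factorial_number x)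

-- ===== LEMMAS AND PROOFS =====

-- k! as an integer
def fac (k : Nat) : Int := (Nat.factorial k : Int)

lemma fac_pos (k : Nat) : 1 ≤ fac k := by
  unfold fac; exact_mod_cast Nat.one_le_iff_ne_zero.mpr (Nat.factorial_ne_zero k)

lemma fac_mono {a b : Nat} (h : a ≤ b) : fac a ≤ fac b := by
  unfold fac; exact_mod_cast Nat.factorial_le h

lemma fac_succ (k : Nat) : fac (k + 1) = fac k * ((k : Int) + 1) := by
  unfold fac; rw [Nat.factorial_succ]; push_cast; ring

-- A's loop, started at fact = k!, n = k, returns x iff x is a factorial ≥ fact.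
lemma loopA_spec (N : Nat) : ∀ (x fact n : Int) (hf : 1 ≤ fact) (hn : 1 ≤ n) (k : Nat),
    fact = fac k → n = (k : Int) → (x - fact).toNat ≤ N →
    (loopA x fact n hf hn = x ↔ ∃ m : Nat, x = fac m ∧ fact ≤ x) := by
  induction N with
  | zero =>
    intro x fact n hf hn k hfk hnk hm
    have hxf : ¬ fact < x := by omega
    rw [loopA, dif_neg hxf]
    constructor
    · intro h; exact ⟨k, by omega, le_of_eq h⟩
    · rintro ⟨m, hx, hle⟩; omega
  | succ N ih =>
    intro x fact n hf hn k hfk hnk hm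
    rw [loopA]
    by_cases hlt : fact < x
    · rw [dif_pos hlt]
      have hstep : fact + 1 ≤ fact * (n + 1) := by nlinarith
      have hfk' : fact * (n + 1) = fac (k + 1) := by rw [fac_succ, hfk, hnk]
      rw [ih x (fact * (n + 1)) (n + 1) (by nlinarith) (by omega) (k + 1) hfk'
        (by push_cast; omega) (by omega)]
      constructor
      · rintro ⟨m, hx, hle⟩; exact ⟨m, hx, by omega⟩
      · rintro ⟨m, hx, hle⟩
        refine ⟨m, hx, ?_⟩
        have hkm : k < m := by
          by_contra hc
          have := fac_mono (show m ≤ k by omega)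
          omega
        have := fac_mono (show k + 1 ≤ m by omega)
        omega
    · rw [dif_neg hlt]
      constructor
      · intro h; exact ⟨k, by omega, le_of_eq h⟩
      · rintro ⟨m, hx, hle⟩; omega

-- ∏ i ∈ [d, m] as an integer
def P (d m : Nat) : Int := ((∏ i ∈ Finset.Icc d m, i : Nat) : Int)

lemma P_of_lt {d m : Nat} (h : m < d) : P d m = 1 := by
  unfold P
  rw [Finset.Icc_eq_empty (by omega)]; simp

lemma P_cons {d m : Nat} (h : d ≤ m) : P d m = (d : Int) * P (d + 1) m := by
  unfold P
  have : Finset.Icc d m = insert d (Finset.Icc (d + 1) m) := by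
    ext i; simp [Finset.mem_Icc, Finset.mem_insert]; omega
  rw [this, Finset.prod_insert (by simp [Finset.mem_Icc])]
  push_cast; ring

lemma prod_Icc_one_id (m : Nat) : ∏ i ∈ Finset.Icc 1 m, i = Nat.factorial m := by
  induction m with
  | zero => decide
  | succ m ih =>
    rw [Finset.prod_Icc_succ_top (by omega), ih, Nat.factorial_succ, Nat.mul_comm]

lemma P_two_eq_fac (m : Nat) : P 2 m = fac m := by
  unfold P fac
  congr 1
  rcases Nat.eq_zero_or_pos m with h | h
  · subst h; decide
  · have h1 : Finset.Icc 1 m = insert 1 (Finset.Icc 2 m) := by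
      ext i; simp only [Finset.mem_Icc, Finset.mem_insert]; omega
    have h2 := prod_Icc_one_id m
    rw [h1, Finset.prod_insert (by simp [Finset.mem_Icc])] at h2
    simpa using h2

-- B's loop returns 1 iff x is a product d·(d+1)···m for some m.
lemma loopB_spec (N : Nat) : ∀ (x d : Int) (hx : 1 ≤ x) (hd : 2 ≤ d) (k : Nat),
    d = (k : Int) → x.toNat ≤ N →
    (loopB x d hx hd = 1 ↔ ∃ m : Nat, x = P k m) := by
  induction N with
  | zero => intro x d hx hd k hdk hm; omega
  | succ N ih =>
    intro x d hx hd k hdk hm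
    have hk2 : 2 ≤ k := by exact_mod_cast hdk ▸ hd
    rw [loopB]
    by_cases hmod : PySem.Int.mod x d = 0
    · rw [dif_pos hmod]
      have hdvd : d ∣ x := (PySem.Int.mod_eq_zero_iff_dvd x d).mp hmod
      have hxd : x = d * PySem.Int.floordiv x d := by
        rw [PySem.Int.floordiv_eq_ediv_of_pos (by omega : (0:Int) < d)]
        exact (Int.mul_ediv_cancel' hdvd).symm
      have hq1 : 1 ≤ PySem.Int.floordiv x d := by nlinarith
      have hqlt : PySem.Int.floordiv x d < x := by nlinarith
      rw [ih (PySem.Int.floordiv x d) (d + 1) hq1 (by omega) (k + 1)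
        (by push_cast; omega) (by omega)]
      constructor
      · rintro ⟨m, hmq⟩
        rcases Nat.lt_or_ge m k with hmk | hmk
        · refine ⟨k, ?_⟩
          rw [P_of_lt (by omega)] at hmq
          rw [P_cons (le_refl k), P_of_lt (by omega)]
          rw [hxd, hmq, hdk]
        · exact ⟨m, by rw [P_cons (by omega : k ≤ m), ← hmq, ← hdk, ← hxd]⟩
      · rintro ⟨m, hmx⟩
        rcases Nat.lt_or_ge m k with hmk | hmk
        · rw [P_of_lt hmk] at hmx
          nlinarith
        · refine ⟨m, ?_⟩
          rw [P_cons (by omega : k ≤ m)] at hmx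
          have : d * PySem.Int.floordiv x d = d * P (k + 1) m := by
            rw [← hxd, hmx, hdk]
          exact mul_left_cancel₀ (by omega : d ≠ 0) this
    · rw [dif_neg hmod]
      constructor
      · intro h; exact ⟨0, by rw [h, P_of_lt (by omega)]⟩
      · rintro ⟨m, hmx⟩
        rcases Nat.lt_or_ge m k with hmk | hmk
        · rw [P_of_lt hmk] at hmx; exact hmx
        · exfalso
          apply hmod
          rw [PySem.Int.mod_eq_zero_iff_dvd]
          exact ⟨P (k + 1) m, by rw [hmx, P_cons hmk, hdk]⟩

lemma A_char (x : Int) : is_factorial_number x = true ↔ ∃ m : Nat, x = fac m := by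
  unfold is_factorial_number
  by_cases h1 : x = 1
  · subst h1; simp
    exact ⟨0, by decide⟩
  · rw [if_neg (by simpa using h1), beq_iff_eq,
      loopA_spec (x - 1).toNat x 1 1 (by omega) (by omega) 1 (by decide) (by simp)
        (le_refl _)]
    constructor
    · rintro ⟨m, hx, _⟩; exact ⟨m, hx⟩
    · rintro ⟨m, hx⟩; exact ⟨m, hx, by have := fac_pos m; omega⟩

lemma B_char (x : Int) : is_factorial_number_alt x = true ↔ ∃ m : Nat, x = fac m := by
  unfold is_factorial_number_alt
  by_cases hlt : x < 1
  · rw [dif_pos hlt]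
    simp only [Bool.false_eq_true, false_iff, not_exists]
    intro m hm; have := fac_pos m; omega
  · rw [dif_neg hlt]
    by_cases h1 : x = 1
    · subst h1; simp
      exact ⟨0, by decide⟩
    · rw [if_neg (by simpa using h1), beq_iff_eq,
        loopB_spec x.toNat x 2 (by omega) (by omega) 2 (by simp) (le_refl _)]
      constructor
      · rintro ⟨m, hm⟩; exact ⟨m, by rw [hm, P_two_eq_fac]⟩
      · rintro ⟨m, hm⟩; exact ⟨m, by rw [hm, P_two_eq_fac]⟩

-- ===== VERDICT (by name: the statement is the Claim_ definition above) =====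
theorem is_factorial_number_spec : Claim_equal_is_factorial_number := by
  intro x _
  unfold Spec_is_factorial_number
  have := (A_char x).trans (B_char x).symm
  cases hA : is_factorial_number x <;> cases hB : is_factorial_number_alt x <;>
    simp_all
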